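-- pv_equiv track=rewrite | github.com/martyav/adventofcode2018 | day_02/solution.py | check_values
-- ===== SOURCE A (Python) =====
-- def freq_counter(text):
--     alphabet = dict()
--
--     for i in range(0, len(text)):
--         char = text[i]
--
--         if char in alphabet:
--             alphabet[char] += 1
--         else:
--             alphabet[char] = 1
--
--     return alphabet
--
-- def check_values(text):
--     counter = freq_counter(text)
--
--     twos = 0
--     threes = 0
--
--     for value in counter.values():
--         if value == 2 and twos == 0:
--             twos += 1
--         if value == 3 and threes == 0:
--             threes += 1
--
--     return {'twos': twos, 'threes': threes}
-- ===== SOURCE B (Python) =====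
-- def check_values(text):
--     twos = 0
--     threes = 0
--     prev = None
--     run = 0
--     for ch in sorted(text):
--         if prev == ch:
--             run += 1
--         else:
--             if run == 2:
--                 twos = 1
--             if run == 3:
--                 threes = 1
--             prev = ch
--             run = 1
--     if run == 2:
--         twos = 1
--     if run == 3:
--         threes = 1
--     return {'twos': twos, 'threes': threes}
-- ===== Notes on version B (the rewrite author's own statement) =====
-- stated objective: alternative
-- what changed: Replaces the hash-table frequency count plus value scan by sorting the characters and run-length scanning consecutive equal runs, setting the twos/threes flags when a run of length 2 or 3 ends.
import Mathlib
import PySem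

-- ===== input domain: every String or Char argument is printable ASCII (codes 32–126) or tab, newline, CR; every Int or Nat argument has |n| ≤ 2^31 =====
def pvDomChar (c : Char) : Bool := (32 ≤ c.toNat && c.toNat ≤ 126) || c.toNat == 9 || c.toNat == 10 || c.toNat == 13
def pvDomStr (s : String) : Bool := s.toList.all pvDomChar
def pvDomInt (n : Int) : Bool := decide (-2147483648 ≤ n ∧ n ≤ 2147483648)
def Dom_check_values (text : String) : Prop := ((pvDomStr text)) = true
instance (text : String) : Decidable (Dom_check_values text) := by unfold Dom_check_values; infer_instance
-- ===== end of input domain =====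

-- B replaces the hash-table frequency count and value scan by sort + run-length scan
-- over consecutive equal characters (alternative algorithm, similar cost).

-- ===== PORT A =====
-- for i in range(0, len(text)): char = text[i]; if char in alphabet: alphabet[char] += 1 else: alphabet[char] = 1
-- (indices drawn from range(0, len(text)) are always in range, so pyGetD's default is never read)
def freq_counter (text : String) : PySem.Dict Char Int :=
  (PySem.List.pyRange 0 (PySem.Str.len text) 1).foldl
    (fun d i =>
      let char := PySem.List.pyGetD text.toList i ' '
      if d.contains char then d.insert char (d.getD char 0 + 1) else d.insert char 1)
    PySem.Dict.empty

def check_values (text : String) : List (String × Int) :=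
  let counter := freq_counter text
  let p := counter.values.foldl
    (fun s v =>
      let twos := if v = 2 ∧ s.1 = 0 then s.1 + 1 else s.1
      let threes := if v = 3 ∧ s.2 = 0 then s.2 + 1 else s.2
      (twos, threes)) ((0 : Int), (0 : Int))
  [("twos", p.1), ("threes", p.2)]

-- ===== PORT B =====
-- for ch in sorted(text): if prev == ch: run += 1 else: (flush run; prev = ch; run = 1); final flush
def scanRuns : List Char → Int → Int → Option Char → Int → Int × Int
  | [], t2, t3, _, run => ((if run = 2 then 1 else t2), (if run = 3 then 1 else t3))
  | ch :: rest, t2, t3, prev, run =>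
    if prev = some ch then scanRuns rest t2 t3 prev (run + 1)
    else scanRuns rest (if run = 2 then 1 else t2) (if run = 3 then 1 else t3) (some ch) 1

def check_values_alt (text : String) : List (String × Int) :=
  let p := scanRuns (PySem.List.sorted text.toList (fun c => c) false) 0 0 none 0
  [("twos", p.1), ("threes", p.2)]

-- ===== PRECONDITION & SPEC =====
def Spec_check_values (text : String) (out : List (String × Int)) : Prop := out = check_values_alt text
instance (text : String) (out : List (String × Int)) : Decidable (Spec_check_values text out) := by unfold Spec_check_values; infer_instance

-- ===== CLAIM (what is proved, stated in full; the proofs are below) =====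
def Claim_equal_check_values : Prop := ∀ (text : String), Dom_check_values text → Spec_check_values text (check_values text)

-- ===== LEMMAS AND PROOFS =====

-- A's loop body over one value, written as a named function (definitionally the fold body in check_values)
def pvStep (s : Int × Int) (v : Int) : Int × Int :=
  (if v = 2 ∧ s.1 = 0 then s.1 + 1 else s.1, if v = 3 ∧ s.2 = 0 then s.2 + 1 else s.2)

theorem check_values_eq (text : String) :
    check_values text =
      [("twos", ((freq_counter text).values.foldl pvStep (0, 0)).1),
       ("threes", ((freq_counter text).values.foldl pvStep (0, 0)).2)] := rfl

-- A's frequency loop builds exactly collections.Counter(text)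
theorem freq_counter_eq_counter (text : String) :
    freq_counter text = PySem.Dict.counter text.toList := by
  have e : freq_counter text
      = List.foldl (fun acc j =>
          (fun (d : PySem.Dict Char Int) char =>
            if d.contains char then d.insert char (d.getD char 0 + 1) else d.insert char 1)
            acc (PySem.List.pyGetD text.toList j ' '))
          PySem.Dict.empty (PySem.List.pyRange 0 (text.toList.length : Int)) := by
    unfold freq_counter
    rw [PySem.Str.len_eq]
  have h1 := PySem.List.foldl_pyRange_zero_pyGetD' text.toList ' '
      (fun (d : PySem.Dict Char Int) char =>
        if d.contains char then d.insert char (d.getD char 0 + 1) else d.insert char 1)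
      PySem.Dict.empty
  have h2 : List.foldl (fun (d : PySem.Dict Char Int) char =>
        if d.contains char then d.insert char (d.getD char 0 + 1) else d.insert char 1)
        PySem.Dict.empty text.toList
      = PySem.Dict.counter text.toList := by
    rw [← PySem.Dict.foldl_insert_getD_add_one_eq_counter]
    apply PySem.List.foldl_congr_mem
    intro d x _
    by_cases h : d.contains x = true
    · simp [h]
    · simp only [Bool.not_eq_true] at h
      simp [h, PySem.Dict.getD_of_not_contains d 0 h]
  exact e.trans (h1.trans h2)

-- Counter's value list is the per-distinct-character count list
theorem counter_values (xs : List Char) :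
    (PySem.Dict.counter xs).values = (PySem.Set.ofList xs).map (fun k => (xs.count k : Int)) := by
  show (PySem.Dict.counter xs).items.map (·.2) = _
  rw [PySem.Dict.items_counter]
  simp

-- A's capped-increment scan over a value list is a pair of membership tests
theorem fold23 (l : List Int) (a b : Int) :
    l.foldl pvStep (a, b)
      = ((if a = 0 ∧ (2 : Int) ∈ l then 1 else a), (if b = 0 ∧ (3 : Int) ∈ l then 1 else b)) := by
  induction l generalizing a b with
  | nil => simp
  | cons v t ih =>
    simp only [List.foldl_cons, pvStep, ih, List.mem_cons, Prod.mk.injEq]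
    constructor <;> split_ifs <;> simp_all

-- processing a run of equal characters just bumps the run counter
theorem scanRuns_replicate (k : Nat) (c : Char) (t : List Char) (t2 t3 r : Int) :
    scanRuns (List.replicate k c ++ t) t2 t3 (some c) r = scanRuns t t2 t3 (some c) (r + k) := by
  induction k generalizing r with
  | zero => simp
  | succ n ih =>
    have e : r + 1 + (n : Int) = r + ((n : Nat) + 1 : Nat) := by push_cast; ring
    simp only [List.replicate_succ, List.cons_append, scanRuns, ih, eq_self_iff_true, if_true]
    rw [e]

-- the run-length scan over a sorted list detects exactly the multiplicities 2 and 3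
theorem scanRuns_sorted (s : List Char) (hs : s.Pairwise (· ≤ ·))
    (prev : Option Char) (hp : ∀ p, prev = some p → ∀ x ∈ s, p < x) (t2 t3 r : Int) :
    scanRuns s t2 t3 prev r
      = ((if r = 2 ∨ ∃ c ∈ s, s.count c = 2 then 1 else t2),
         (if r = 3 ∨ ∃ c ∈ s, s.count c = 3 then 1 else t3)) := by
  match s with
  | [] => simp [scanRuns]
  | ch :: rest =>
    have hne : prev ≠ some ch := by
      intro h
      exact absurd rfl (ne_of_gt (hp ch h ch (by simp)))
    rw [List.pairwise_cons] at hs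
    -- split rest into the leading run of ch and the strictly larger tail
    set t := rest.dropWhile (· == ch) with ht
    set k := (rest.takeWhile (· == ch)).length with hk
    have hrest : rest = List.replicate k ch ++ t := by
      conv_lhs => rw [← List.takeWhile_append_dropWhile (p := (· == ch)) (l := rest)]
      congr 1
      rw [List.eq_replicate_iff]
      exact ⟨rfl, fun x hx => by simpa using List.mem_takeWhile_imp hx⟩
    have htsub : ∀ x ∈ t, x ∈ rest := fun x hx => by
      rw [hrest]; exact List.mem_append_right _ hx
    have hpw' : (List.replicate k ch ++ t).Pairwise (· ≤ ·) := hrest ▸ hs.2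
    have htpw : t.Pairwise (· ≤ ·) := (List.pairwise_append.mp hpw').2.1
    have htgt : ∀ x ∈ t, ch < x := by
      intro x hx
      cases ht' : t with
      | nil => rw [ht'] at hx; cases hx
      | cons y ys =>
        have hy : (y == ch) = false := by
          have h0 := List.head?_dropWhile_not (· == ch) rest
          rw [← ht, ht'] at h0
          simpa using h0
        have hchy : ch < y :=
          lt_of_le_of_ne (hs.1 y (htsub y (by rw [ht']; simp)))
            (Ne.symm (by simpa using hy))
        rw [ht'] at hx
        rcases List.mem_cons.mp hx with h | h
        · exact h ▸ hchy
        · exact lt_of_lt_of_le hchy ((List.pairwise_cons.mp (ht' ▸ htpw)).1 x h)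
    have hchnot : ch ∉ t := fun h => lt_irrefl ch (htgt ch h)
    have hlen : t.length < rest.length + 1 := by
      have := List.length_dropWhile_le (· == ch) rest
      rw [← ht] at this; omega
    -- one step of the loop, then the run, then the tail by induction
    rw [show scanRuns (ch :: rest) t2 t3 prev r
        = scanRuns rest (if r = 2 then 1 else t2) (if r = 3 then 1 else t3) (some ch) 1 by
      simp [scanRuns, hne]]
    rw [hrest, scanRuns_replicate,
        scanRuns_sorted t htpw (some ch)
          (by intro p h x hx; cases h; exact htgt x hx) _ _ _]
    -- counts: ch occurs 1 + k times in s; other characters keep their t-count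
    have hcount_ch : (ch :: rest).count ch = 1 + k := by
      rw [hrest]
      simp [List.count_cons, List.count_append, List.count_replicate,
            List.count_eq_zero.mpr hchnot]
      omega
    have hcount_other : ∀ c, c ≠ ch → (ch :: rest).count c = t.count c := by
      intro c hc
      rw [hrest]
      simp [List.count_cons, List.count_append, List.count_replicate, hc,
            show ch ≠ c from fun h => hc h.symm]
    have hmem2 : (∃ c ∈ ch :: rest, (ch :: rest).count c = 2)
        ↔ ((1 : Int) + k = 2 ∨ ∃ c ∈ t, t.count c = 2) := by
      constructor
      · rintro ⟨c, hcmem, hcc⟩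
        by_cases hc : c = ch
        · subst hc; rw [hcount_ch] at hcc; left; exact_mod_cast by omega
        · right
          refine ⟨c, ?_, by rw [← hcount_other c hc]; exact hcc⟩
          rcases List.mem_cons.mp hcmem with h | h
          · exact absurd h hc
          · rw [hrest] at h
            rcases List.mem_append.mp h with h | h
            · exact absurd (List.eq_of_mem_replicate h) hc
            · exact h
      · rintro (h | ⟨c, hcmem, hcc⟩)
        · exact ⟨ch, by simp, by rw [hcount_ch]; exact_mod_cast by omega⟩
        · have hc : c ≠ ch := fun h => hchnot (h ▸ hcmem)
          exact ⟨c, by simp [htsub c hcmem], by rw [hcount_other c hc]; exact hcc⟩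
    have hmem3 : (∃ c ∈ ch :: rest, (ch :: rest).count c = 3)
        ↔ ((1 : Int) + k = 3 ∨ ∃ c ∈ t, t.count c = 3) := by
      constructor
      · rintro ⟨c, hcmem, hcc⟩
        by_cases hc : c = ch
        · subst hc; rw [hcount_ch] at hcc; left; exact_mod_cast by omega
        · right
          refine ⟨c, ?_, by rw [← hcount_other c hc]; exact hcc⟩
          rcases List.mem_cons.mp hcmem with h | h
          · exact absurd h hc
          · rw [hrest] at h
            rcases List.mem_append.mp h with h | h
            · exact absurd (List.eq_of_mem_replicate h) hc
            · exact h
      · rintro (h | ⟨c, hcmem, hcc⟩)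
        · exact ⟨ch, by simp, by rw [hcount_ch]; exact_mod_cast by omega⟩
        · have hc : c ≠ ch := fun h => hchnot (h ▸ hcmem)
          exact ⟨c, by simp [htsub c hcmem], by rw [hcount_other c hc]; exact hcc⟩
    rw [hrest] at hmem2 hmem3
    simp only [Prod.mk.injEq]
    constructor
    · simp only [hmem2]
      by_cases hA : (1 : Int) + k = 2 ∨ ∃ c ∈ t, List.count c t = 2
      · rw [if_pos hA, if_pos (Or.inr hA)]
      · rw [if_neg hA]
        by_cases hr : r = 2
        · rw [if_pos hr, if_pos (Or.inl hr)]
        · rw [if_neg hr, if_neg (by rintro (h | h); exacts [hr h, hA h])]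
    · simp only [hmem3]
      by_cases hA : (1 : Int) + k = 3 ∨ ∃ c ∈ t, List.count c t = 3
      · rw [if_pos hA, if_pos (Or.inr hA)]
      · rw [if_neg hA]
        by_cases hr : r = 3
        · rw [if_pos hr, if_pos (Or.inl hr)]
        · rw [if_neg hr, if_neg (by rintro (h | h); exacts [hr h, hA h])]
termination_by s.length
decreasing_by simpa using hlen

-- ===== VERDICT (by name: the statement is the Claim_ definition above) =====
theorem check_values_spec : Claim_equal_check_values := by
  intro text _
  unfold Spec_check_values
  rw [check_values_eq, freq_counter_eq_counter, counter_values, fold23]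
  unfold check_values_alt
  have hperm : (PySem.List.sorted text.toList (fun c => c) false).Perm text.toList :=
    PySem.List.sorted_perm text.toList (fun c => c) false
  rw [scanRuns_sorted (PySem.List.sorted text.toList (fun c => c) false)
        (PySem.List.sorted_pairwise text.toList (fun c => c))
        none (fun p h => by cases h) 0 0 0]
  have e2 : ((0 : Int) = 0 ∧ (2 : Int) ∈ (PySem.Set.ofList text.toList).map
        (fun k => (text.toList.count k : Int)))
      ↔ ((0 : Int) = 2 ∨ ∃ c ∈ PySem.List.sorted text.toList (fun c => c) false,
          (PySem.List.sorted text.toList (fun c => c) false).count c = 2) := by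
    simp only [List.mem_map, PySem.Set.mem_ofList, hperm.mem_iff,
      fun c => hperm.count_eq c, true_and, eq_self_iff_true]
    constructor
    · rintro ⟨c, hc, hcc⟩
      exact Or.inr ⟨c, hc, by exact_mod_cast hcc⟩
    · rintro (h | ⟨c, hc, hcc⟩)
      · exact absurd h (by norm_num)
      · exact ⟨c, hc, by exact_mod_cast hcc⟩
  have e3 : ((0 : Int) = 0 ∧ (3 : Int) ∈ (PySem.Set.ofList text.toList).map
        (fun k => (text.toList.count k : Int)))
      ↔ ((0 : Int) = 3 ∨ ∃ c ∈ PySem.List.sorted text.toList (fun c => c) false,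
          (PySem.List.sorted text.toList (fun c => c) false).count c = 3) := by
    simp only [List.mem_map, PySem.Set.mem_ofList, hperm.mem_iff,
      fun c => hperm.count_eq c, true_and, eq_self_iff_true]
    constructor
    · rintro ⟨c, hc, hcc⟩
      exact Or.inr ⟨c, hc, by exact_mod_cast hcc⟩
    · rintro (h | ⟨c, hc, hcc⟩)
      · exact absurd h (by norm_num)
      · exact ⟨c, hc, by exact_mod_cast hcc⟩
  rw [if_congr e2 rfl rfl, if_congr e3 rfl rfl]
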